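-- pv_equiv track=rewrite | github.com/emily-hu/6869_project | preprocessing.py | getStaffLineSpacePositions
-- ===== SOURCE A (Python) =====
-- def getStaffLineSpacePositions(staffLines):
-- 	'''
-- 	finds the lines and spaces from the 5 lines positions
--
-- 	when passed in line positions from top to bottom, returned are top to bottom
-- 	and vice versa
-- 	'''
--
-- 	lineSpacePosition = []
-- 	for i in range(len(staffLines)):
-- 		lineStart, lineEnd = staffLines[i]
-- 		lineMiddle = round((lineStart + lineEnd)/2)
-- 		lineSpacePosition.append(lineMiddle)
--
-- 		if i+1 < len(staffLines): # can you get the next line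
-- 			nextLineStart, nextLineEnd = staffLines[i+1]
-- 			spaceMiddle = round((lineEnd+nextLineStart)/2)
-- 			lineSpacePosition.append(spaceMiddle)
--
-- 	return lineSpacePosition
-- ===== SOURCE B (Python) =====
-- def getStaffLineSpacePositions(staffLines):
--     # Flatten all line boundaries into one sequence s0,e0,s1,e1,...;
--     # the answer is simply the midpoint of every adjacent pair of boundaries.
--     flat = [x for pair in staffLines for x in pair]
--     return [round((a + b) / 2) for a, b in zip(flat, flat[1:])]
-- ===== Notes on version B (the rewrite author's own statement) =====
-- stated objective: alternative
-- what changed: B drops the line/space case split entirely: it flattens all (start,end) boundaries into one sequence and takes the midpoint of every adjacent boundary pair, whereas A runs an index loop distinguishing line midpoints from lookahead space midpoints.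
import Mathlib
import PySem

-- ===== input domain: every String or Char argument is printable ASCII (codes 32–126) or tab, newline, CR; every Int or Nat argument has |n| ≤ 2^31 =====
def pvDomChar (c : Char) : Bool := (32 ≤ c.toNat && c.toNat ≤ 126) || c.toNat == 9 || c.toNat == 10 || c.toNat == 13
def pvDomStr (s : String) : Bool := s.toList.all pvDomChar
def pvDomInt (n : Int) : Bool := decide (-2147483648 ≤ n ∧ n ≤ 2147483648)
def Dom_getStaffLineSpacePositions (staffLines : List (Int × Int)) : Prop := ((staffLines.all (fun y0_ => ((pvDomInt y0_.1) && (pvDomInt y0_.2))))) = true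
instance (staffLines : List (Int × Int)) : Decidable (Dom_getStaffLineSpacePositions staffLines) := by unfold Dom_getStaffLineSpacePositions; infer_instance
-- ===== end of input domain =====

-- B drops A's line/space case split: it flattens the boundaries into one sequence and takes
-- the midpoint of every adjacent pair; same cost, genuinely different decomposition.

-- Hand port of Python's round((a+b)/2) on ints a,b: the float a+b and its half are exact for
-- |a+b| ≤ 2^32, so this is exactly banker's rounding of s/2 (ties go to the even integer).
def pvHalf (s : Int) : Int :=
  if s % 2 = 0 then PySem.Int.floordiv s 2
  else
    let k := PySem.Int.floordiv s 2
    if k % 2 = 0 then k else k + 1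

-- ===== PORT A =====
-- A's loop over i with lookahead staffLines[i+1], transcribed as structural recursion.
def getStaffLineSpacePositions : List (Int × Int) → List Int
  | [] => []
  | (s, e) :: rest =>
    match rest with
    | [] => [pvHalf (s + e)]
    | (ns, _) :: _ => pvHalf (s + e) :: pvHalf (e + ns) :: getStaffLineSpacePositions rest

-- ===== PORT B =====
def getStaffLineSpacePositions_alt (staffLines : List (Int × Int)) : List Int :=
  let flat := staffLines.flatMap (fun p => [p.1, p.2])
  (flat.zip flat.tail).map (fun ab => pvHalf (ab.1 + ab.2))

-- ===== PRECONDITION & SPEC =====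
def Spec_getStaffLineSpacePositions (staffLines : List (Int × Int)) (out : List Int) : Prop := out = getStaffLineSpacePositions_alt staffLines
instance (staffLines : List (Int × Int)) (out : List Int) : Decidable (Spec_getStaffLineSpacePositions staffLines out) := by unfold Spec_getStaffLineSpacePositions; infer_instance

-- ===== CLAIM =====
def Claim_equal_getStaffLineSpacePositions : Prop := ∀ (staffLines : List (Int × Int)), Dom_getStaffLineSpacePositions staffLines → Spec_getStaffLineSpacePositions staffLines (getStaffLineSpacePositions staffLines)

-- ===== LEMMAS AND PROOFS =====
theorem pv_eq (l : List (Int × Int)) :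
    getStaffLineSpacePositions l = getStaffLineSpacePositions_alt l := by
  induction l with
  | nil => rfl
  | cons a rest ih =>
    cases rest with
    | nil => rfl
    | cons b rest2 =>
      simp only [getStaffLineSpacePositions, getStaffLineSpacePositions_alt,
        List.flatMap_cons, List.cons_append, List.nil_append, List.tail_cons,
        List.zip_cons_cons, List.map_cons] at ih ⊢
      rw [ih]

-- ===== VERDICT =====
theorem getStaffLineSpacePositions_spec : Claim_equal_getStaffLineSpacePositions := by
  intro l _
  unfold Spec_getStaffLineSpacePositions
  exact pv_eq l
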